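-- pv_equiv track=rewrite | github.com/tsarevsergey/IVtestsuite | ui/pages/6_Experiment_Wizard.py | parse_pixel_string
-- ===== SOURCE A (Python) =====
-- from typing import Dict, Any, List
--
-- def parse_pixel_string(pixel_str: str) -> List[int]:
--     pixels = []
--     for part in pixel_str.split(','):
--         part = part.strip()
--         if not part: continue
--         if '-' in part:
--             start, end = map(int, part.split('-'))
--             pixels.extend(range(start, end + 1))
--         else:
--             pixels.append(int(part))
--     return sorted(list(set(pixels)))
-- ===== SOURCE B (Python) =====
-- def _insert_unique(acc, x):
--     # insert x into the sorted duplicate-free list acc, keeping it sorted and duplicate-free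
--     i = 0
--     while i < len(acc) and acc[i] < x:
--         i += 1
--     if i < len(acc) and acc[i] == x:
--         return acc
--     return acc[:i] + [x] + acc[i:]
--
-- def parse_pixel_string(pixel_str):
--     acc = []
--     for part in pixel_str.split(','):
--         part = part.strip()
--         if not part:
--             continue
--         if '-' in part:
--             start, end = map(int, part.split('-'))
--         else:
--             start = end = int(part)
--         while start <= end:
--             acc = _insert_unique(acc, start)
--             start += 1
--     return acc
-- ===== Notes on version B (the rewrite author's own statement) =====
-- stated objective: alternative
-- what changed: A collects all pixel numbers into a flat list and only at the end deduplicates via set() and sorts; B never builds that list: it parses each part into a (start,end) run and maintains a single sorted duplicate-free accumulator by ordered insertion, so the result needs no final set() or sort().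
import Mathlib
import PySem

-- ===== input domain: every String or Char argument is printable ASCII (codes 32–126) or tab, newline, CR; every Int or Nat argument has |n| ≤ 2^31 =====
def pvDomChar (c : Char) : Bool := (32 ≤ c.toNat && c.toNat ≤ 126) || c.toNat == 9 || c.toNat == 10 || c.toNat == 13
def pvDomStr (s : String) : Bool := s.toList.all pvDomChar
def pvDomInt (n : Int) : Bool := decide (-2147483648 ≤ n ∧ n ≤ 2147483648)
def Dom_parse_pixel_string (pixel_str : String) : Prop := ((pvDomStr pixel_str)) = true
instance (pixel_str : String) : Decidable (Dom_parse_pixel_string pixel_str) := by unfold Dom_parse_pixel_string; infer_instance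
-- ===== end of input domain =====

-- B replaces A's collect-then-set()-then-sort() pipeline by a single pass that keeps the
-- accumulator sorted and duplicate-free at all times via ordered insertion (objective: alternative).

-- ===== PORT A =====
-- loop body of A's 'for part in pixel_str.split(',')'
def pvStepA (pixels : List Int) (part : String) : List Int :=
  let part := PySem.Str.strip part
  if part = "" then pixels
  else if PySem.Str.isIn "-" part then
    match ((PySem.Str.split? part "-").getD []) with
    | [a, b] =>
        pixels ++ PySem.List.pyRange ((PySem.Int.ofStr? a).getD 0)
                    (((PySem.Int.ofStr? b).getD 0) + 1) 1
    | _ => pixels   -- Python raises ValueError here; excluded by Pre_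
  else pixels ++ [(PySem.Int.ofStr? part).getD 0]

def parse_pixel_string (pixel_str : String) : List Int :=
  let pixels := (((PySem.Str.split? pixel_str ",").getD [])).foldl pvStepA []
  PySem.List.sorted (PySem.Set.ofList pixels) (fun x => x) false

-- ===== PORT B =====
-- 'while i < len(acc) and acc[i] < x: i += 1' as the obvious structural recursion on acc
def pvInsPos : List Int → Int → Nat
  | [], _ => 0
  | h :: t, x => if h < x then pvInsPos t x + 1 else 0

def pvInsertUnique (acc : List Int) (x : Int) : List Int :=
  -- i = pvInsPos acc x; 'if i < len(acc) and acc[i] == x: return acc; return acc[:i] + [x] + acc[i:]'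
  if pvInsPos acc x < acc.length ∧ acc.getD (pvInsPos acc x) 0 = x then acc
  else acc.take (pvInsPos acc x) ++ [x] ++ acc.drop (pvInsPos acc x)

-- B's inner 'while start <= end: acc = _insert_unique(acc, start); start += 1'
def pvFill (acc : List Int) (s e : Int) : List Int :=
  if s ≤ e then pvFill (pvInsertUnique acc s) (s + 1) e else acc
termination_by (e + 1 - s).toNat
decreasing_by omega

-- loop body of B's 'for part in pixel_str.split(',')'
def pvStepB (acc : List Int) (part : String) : List Int :=
  let part := PySem.Str.strip part
  if part = "" then acc
  else
    let se : Int × Int :=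
      if PySem.Str.isIn "-" part then
        match ((PySem.Str.split? part "-").getD []) with
        | [a, b] => ((PySem.Int.ofStr? a).getD 0, (PySem.Int.ofStr? b).getD 0)
        | _ => (0, -1)   -- Python raises ValueError here; excluded by Pre_
      else ((PySem.Int.ofStr? part).getD 0, (PySem.Int.ofStr? part).getD 0)
    pvFill acc se.1 se.2

def parse_pixel_string_alt (pixel_str : String) : List Int :=
  (((PySem.Str.split? pixel_str ",").getD [])).foldl pvStepB []

-- ===== PRECONDITION & SPEC =====
-- a comma part on which Python's int() conversions all succeed (or which is blank)
def pvPartOK (part : String) : Bool :=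
  let p := PySem.Str.strip part
  if p = "" then true
  else if PySem.Str.isIn "-" p then
    match ((PySem.Str.split? p "-").getD []) with
    | [a, b] => (PySem.Int.ofStr? a).isSome && (PySem.Int.ofStr? b).isSome
    | _ => false
  else (PySem.Int.ofStr? p).isSome

-- exactly the inputs where Python A returns: every part is blank, a single int, or an int-int range
def Pre_parse_pixel_string (pixel_str : String) : Prop :=
  ∀ part ∈ ((PySem.Str.split? pixel_str ",").getD []), pvPartOK part = true
instance (pixel_str : String) : Decidable (Pre_parse_pixel_string pixel_str) := by
  unfold Pre_parse_pixel_string; infer_instance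

def pvWitness_parse_pixel_string : String := "4-7, 2 ,6-3,5"

def Spec_parse_pixel_string (pixel_str : String) (out : List Int) : Prop := out = parse_pixel_string_alt pixel_str
instance (pixel_str : String) (out : List Int) : Decidable (Spec_parse_pixel_string pixel_str out) := by unfold Spec_parse_pixel_string; infer_instance

-- ===== CLAIM (what is proved, stated in full; the proofs are below) =====
def Claim_equal_parse_pixel_string : Prop := ∀ (pixel_str : String), Dom_parse_pixel_string pixel_str → Pre_parse_pixel_string pixel_str → Spec_parse_pixel_string pixel_str (parse_pixel_string pixel_str)

-- ===== LEMMAS AND PROOFS =====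

-- recursive view of pvInsertUnique (ordered insert keeping duplicates out)
def pvIns : List Int → Int → List Int
  | [], x => [x]
  | h :: t, x => if h < x then h :: pvIns t x else if h = x then h :: t else x :: h :: t

theorem pvInsertUnique_eq (acc : List Int) (x : Int) : pvInsertUnique acc x = pvIns acc x := by
  induction acc with
  | nil =>
    unfold pvInsertUnique pvIns pvInsPos
    simp
  | cons h t ih =>
    by_cases hx : h < x
    · have hpos : pvInsPos (h :: t) x = pvInsPos t x + 1 := by rw [pvInsPos, if_pos hx]
      have hstep : pvInsertUnique (h :: t) x = h :: pvInsertUnique t x := by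
        unfold pvInsertUnique
        rw [hpos]
        simp only [List.length_cons, List.getD_cons_succ, List.take_succ_cons,
          List.drop_succ_cons, add_lt_add_iff_right]
        split <;> rfl
      rw [hstep, ih, pvIns, if_pos hx]
    · have hpos : pvInsPos (h :: t) x = 0 := by rw [pvInsPos, if_neg hx]
      unfold pvInsertUnique
      rw [hpos, pvIns, if_neg hx]
      simp only [List.length_cons, List.getD_cons_zero, List.take_zero, List.drop_zero,
        Nat.zero_lt_succ, true_and, List.nil_append, List.singleton_append]

theorem mem_pvIns (l : List Int) (x a : Int) : a ∈ pvIns l x ↔ a = x ∨ a ∈ l := by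
  induction l with
  | nil => simp [pvIns]
  | cons h t ih =>
    simp only [pvIns]
    split_ifs with h1 h2 <;> simp_all <;> tauto

theorem pairwise_pvIns (l : List Int) (x : Int) (h : l.Pairwise (· < ·)) :
    (pvIns l x).Pairwise (· < ·) := by
  induction l with
  | nil => simp [pvIns]
  | cons hd t ih =>
    simp only [pvIns]
    rcases List.pairwise_cons.mp h with ⟨hall, ht⟩
    split_ifs with h1 h2
    · refine List.pairwise_cons.mpr ⟨?_, ih ht⟩
      intro b hb
      rcases (mem_pvIns t x b).mp hb with rfl | hb
      · exact h1
      · exact hall b hb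
    · exact h
    · refine List.pairwise_cons.mpr ⟨?_, h⟩
      intro b hb
      rcases List.mem_cons.mp hb with rfl | hb
      · omega
      · have := hall b hb; omega

theorem foldl_insert_unique (vals : List Int) (acc : List Int) (h : acc.Pairwise (· < ·)) :
    (vals.foldl pvInsertUnique acc).Pairwise (· < ·) ∧
    (∀ a, a ∈ vals.foldl pvInsertUnique acc ↔ a ∈ acc ∨ a ∈ vals) := by
  induction vals generalizing acc with
  | nil => simp [h]
  | cons v t ih =>
    have h' : (pvInsertUnique acc v).Pairwise (· < ·) := by
      rw [pvInsertUnique_eq]; exact pairwise_pvIns acc v h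
    obtain ⟨hs, hm⟩ := ih (pvInsertUnique acc v) h'
    refine ⟨hs, fun a => ?_⟩
    rw [List.foldl_cons, hm a, pvInsertUnique_eq, mem_pvIns]
    simp; tauto

theorem pvFill_eq_foldl (acc : List Int) (s e : Int) :
    pvFill acc s e = (PySem.List.pyRange s (e + 1) 1).foldl pvInsertUnique acc := by
  fun_induction pvFill acc s e with
  | case1 acc s hle ih =>
    rw [PySem.List.pyRange_one_cons (show s < e + 1 by omega), List.foldl_cons, ih]
  | case2 acc s hle =>
    rw [PySem.List.pyRange_one_eq_nil (show e + 1 ≤ s by omega), List.foldl_nil]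

theorem step_main (parts : List String) (accA accB : List Int)
    (hS : accB.Pairwise (· < ·)) (hM : ∀ a, a ∈ accB ↔ a ∈ accA) :
    (parts.foldl pvStepB accB).Pairwise (· < ·) ∧
    (∀ a, a ∈ parts.foldl pvStepB accB ↔ a ∈ parts.foldl pvStepA accA) := by
  induction parts generalizing accA accB with
  | nil => exact ⟨hS, hM⟩
  | cons part t ih =>
    rw [List.foldl_cons, List.foldl_cons]
    -- show the one-part step adds the same values on both sides
    obtain ⟨vals, hA, hB⟩ : ∃ vals : List Int,
        pvStepA accA part = accA ++ vals ∧
        pvStepB accB part = vals.foldl pvInsertUnique accB := by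
      unfold pvStepA pvStepB
      by_cases h0 : PySem.Str.strip part = ""
      · exact ⟨[], by simp [h0], by simp [h0]⟩
      · simp only [h0, ite_false]
        by_cases h1 : PySem.Str.isIn "-" (PySem.Str.strip part) = true
        · simp only [h1, ite_true]
          cases hsp : ((PySem.Str.split? (PySem.Str.strip part) "-").getD []) with
          | nil => exact ⟨[], by simp, by simp [pvFill_eq_foldl]⟩
          | cons a t2 =>
            cases t2 with
            | nil => exact ⟨[], by simp, by simp [pvFill_eq_foldl]⟩
            | cons b t3 =>
              cases t3 with
              | nil => exact ⟨_, rfl, by simp [pvFill_eq_foldl]⟩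
              | cons c t4 => exact ⟨[], by simp, by simp [pvFill_eq_foldl]⟩
        · simp only [h1]
          refine ⟨[(PySem.Int.ofStr? (PySem.Str.strip part)).getD 0], rfl, ?_⟩
          simp [pvFill_eq_foldl, PySem.List.pyRange_one_singleton]
    rw [hA, hB]
    obtain ⟨hs', hm'⟩ := foldl_insert_unique vals accB hS
    refine ih (accA ++ vals) (vals.foldl pvInsertUnique accB) hs' ?_
    intro a
    rw [hm' a, List.mem_append, hM a]

-- ===== VERDICT (by name: the statement is the Claim_ definition above) =====
theorem parse_pixel_string_spec : Claim_equal_parse_pixel_string := by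
  intro s _ _
  unfold Spec_parse_pixel_string parse_pixel_string parse_pixel_string_alt
  obtain ⟨hs, hm⟩ := step_main (((PySem.Str.split? s ",").getD [])) [] [] (by simp) (by simp)
  set pixels := (((PySem.Str.split? s ",").getD [])).foldl pvStepA []
  set b := (((PySem.Str.split? s ",").getD [])).foldl pvStepB []
  have hperm : b.Perm (PySem.Set.ofList pixels) := by
    refine (List.perm_ext_iff_of_nodup ?_ (PySem.Set.nodup_ofList pixels)).mpr ?_
    · exact hs.imp (fun hab => ne_of_lt hab)
    · intro a
      rw [hm a, PySem.Set.mem_ofList]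
  exact PySem.List.sorted_eq_of_perm_of_pairwise_lt (PySem.Set.ofList pixels) b (fun x => x) hperm hs
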